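-- pv_equiv track=rewrite | github.com/MikeVenge/bernstein-new | enhanced_field_scoping.py | apply_financial_scoping_rules
-- ===== SOURCE A (Python) =====
-- def apply_financial_scoping_rules(scoped_name: str, field_name: str, statement: str, section: str, subsection: str) -> str:
--     """
--     Apply specific financial statement scoping rules.
--     """
--     # Geographic regions
--     geographic_terms = ['north_america', 'united_states', 'germany', 'china', 'japan', 'korea', 'europe', 'asia']
--     if any(geo in field_name for geo in geographic_terms):
--         if 'revenue' in scoped_name.lower() or 'sales' in scoped_name.lower():
--             return f"Revenue_Statement.Geographic_Breakdown.{field_name.title().replace('_', '_')}"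
--
--     # Product categories
--     product_terms = ['materials_processing', 'high_power', 'pulsed', 'qcw', 'systems']
--     if any(prod in field_name for prod in product_terms):
--         return f"Revenue_Statement.Product_Breakdown.{field_name.title().replace('_', '_')}"
--
--     # Cash flow activities
--     if statement and 'cash' in statement.lower():
--         if 'operating' in scoped_name.lower():
--             return f"CashFlow_Statement.Operating_Activities.{field_name.title().replace('_', '_')}"
--         elif 'investing' in scoped_name.lower():
--             return f"CashFlow_Statement.Investing_Activities.{field_name.title().replace('_', '_')}"
--         elif 'financing' in scoped_name.lower():
--             return f"CashFlow_Statement.Financing_Activities.{field_name.title().replace('_', '_')}"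
--
--     # Balance sheet items
--     if statement and 'balance' in statement.lower():
--         if any(term in field_name for term in ['asset', 'cash', 'inventory', 'receivable']):
--             return f"Balance_Sheet.Assets.{field_name.title().replace('_', '_')}"
--         elif any(term in field_name for term in ['liability', 'payable', 'debt']):
--             return f"Balance_Sheet.Liabilities.{field_name.title().replace('_', '_')}"
--         elif any(term in field_name for term in ['equity', 'retained', 'capital']):
--             return f"Balance_Sheet.Equity.{field_name.title().replace('_', '_')}"
--
--     # Income statement items
--     if statement and ('income' in statement.lower() or 'operations' in statement.lower()):
--         if any(term in field_name for term in ['revenue', 'sales', 'net_sales']):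
--             return f"Income_Statement.Revenue.{field_name.title().replace('_', '_')}"
--         elif any(term in field_name for term in ['cost', 'expense']):
--             return f"Income_Statement.Expenses.{field_name.title().replace('_', '_')}"
--         elif 'total' in field_name:
--             return f"Income_Statement.Totals.{field_name.title().replace('_', '_')}"
--
--     # Default: return enhanced version of original
--     return scoped_name
-- ===== SOURCE B (Python) =====
-- # Exhaustive-scoring re-implementation: instead of a short-circuiting cascade, evaluate ALL
-- # eleven category predicates up front into a prefix->(condition) table, collect every matching
-- # (priority, prefix) pair, and pick the winner with min(); no match -> scoped_name unchanged.
-- def apply_financial_scoping_rules(scoped_name: str, field_name: str, statement: str, section: str, subsection: str) -> str: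
--     sl = scoped_name.lower()
--     stl = statement.lower()
--
--     def hits(s, terms):
--         return any(t in s for t in terms)
--
--     conditions = {
--         'Revenue_Statement.Geographic_Breakdown':
--             hits(field_name, ['north_america', 'united_states', 'germany', 'china',
--                               'japan', 'korea', 'europe', 'asia']) and hits(sl, ['revenue', 'sales']),
--         'Revenue_Statement.Product_Breakdown':
--             hits(field_name, ['materials_processing', 'high_power', 'pulsed', 'qcw', 'systems']),
--         'CashFlow_Statement.Operating_Activities': 'cash' in stl and 'operating' in sl,
--         'CashFlow_Statement.Investing_Activities': 'cash' in stl and 'investing' in sl,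
--         'CashFlow_Statement.Financing_Activities': 'cash' in stl and 'financing' in sl,
--         'Balance_Sheet.Assets':
--             'balance' in stl and hits(field_name, ['asset', 'cash', 'inventory', 'receivable']),
--         'Balance_Sheet.Liabilities':
--             'balance' in stl and hits(field_name, ['liability', 'payable', 'debt']),
--         'Balance_Sheet.Equity':
--             'balance' in stl and hits(field_name, ['equity', 'retained', 'capital']),
--         'Income_Statement.Revenue':
--             hits(stl, ['income', 'operations']) and hits(field_name, ['revenue', 'sales', 'net_sales']),
--         'Income_Statement.Expenses':
--             hits(stl, ['income', 'operations']) and hits(field_name, ['cost', 'expense']),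
--         'Income_Statement.Totals':
--             hits(stl, ['income', 'operations']) and 'total' in field_name,
--     }
--     winners = [(rank, prefix) for rank, (prefix, ok) in enumerate(conditions.items()) if ok]
--     if not winners:
--         return scoped_name
--     return f"{min(winners)[1]}.{field_name.title()}"
-- ===== Notes on version B (the rewrite author's own statement) =====
-- stated objective: alternative
-- what changed: A's short-circuiting if/elif cascade is replaced by an exhaustive-scoring pass: all eleven category predicates are evaluated up front into a prefix->condition dict, every matching (priority, prefix) pair is collected, and the winner is chosen with min(); equivalence holds because the predicates are pure and priorities follow A's precedence order (the geographic fall-through becomes a conjunctive predicate, and the no-op .replace('_','_') is dropped).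
import Mathlib
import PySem

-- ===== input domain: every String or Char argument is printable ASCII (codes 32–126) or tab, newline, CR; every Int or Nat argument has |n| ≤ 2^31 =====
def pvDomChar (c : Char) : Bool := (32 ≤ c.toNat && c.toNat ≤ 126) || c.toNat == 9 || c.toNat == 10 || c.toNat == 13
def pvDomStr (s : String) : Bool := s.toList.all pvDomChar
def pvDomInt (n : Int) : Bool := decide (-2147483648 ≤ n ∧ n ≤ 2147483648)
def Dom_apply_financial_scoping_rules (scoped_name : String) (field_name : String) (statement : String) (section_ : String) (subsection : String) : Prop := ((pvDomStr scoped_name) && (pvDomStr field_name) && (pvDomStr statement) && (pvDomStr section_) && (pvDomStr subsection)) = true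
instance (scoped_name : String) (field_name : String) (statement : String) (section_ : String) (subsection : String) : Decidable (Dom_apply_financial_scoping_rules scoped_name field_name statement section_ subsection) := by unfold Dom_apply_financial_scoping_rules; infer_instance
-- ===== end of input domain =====

-- B replaces A's short-circuiting if/elif cascade by an exhaustive-scoring pass (all category
-- predicates evaluated up front, matches collected, winner picked with min); objective: alternative.


-- hand port of Python's str.title() (PySem has none): a letter is uppercased after a non-letter,
-- lowercased after a letter; exact on the ASCII domain. Used by both ports (both Pythons call .title()).
def pyTitleGo : Bool → List Char → List Char
  | _, [] => []
  | prevAlpha, c :: t =>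
      (if PySem.Chars.isalpha c then
        (if prevAlpha then PySem.Chars.lowerChar c else PySem.Chars.upperChar c)
      else c) :: pyTitleGo (PySem.Chars.isalpha c) t

def pyTitle (s : String) : String := String.mk (pyTitleGo false s.toList)

-- ===== PORT A =====
-- A's sequential return-blocks become a chain of helper defs, one per block, in source order.
def aTitled (field_name : String) : String :=
  PySem.Str.replace (pyTitle field_name) "_" "_"   -- A's  field_name.title().replace('_', '_')

def aIncome (scoped_name field_name statement : String) : String :=
  if (!(statement == "")) && (PySem.Str.isIn "income" (PySem.Str.lower statement) || PySem.Str.isIn "operations" (PySem.Str.lower statement)) then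
    if ["revenue", "sales", "net_sales"].any (fun t => PySem.Str.isIn t field_name) then
      "Income_Statement.Revenue." ++ aTitled field_name
    else if ["cost", "expense"].any (fun t => PySem.Str.isIn t field_name) then
      "Income_Statement.Expenses." ++ aTitled field_name
    else if PySem.Str.isIn "total" field_name then
      "Income_Statement.Totals." ++ aTitled field_name
    else scoped_name
  else scoped_name

def aBalance (scoped_name field_name statement : String) : String :=
  if (!(statement == "")) && PySem.Str.isIn "balance" (PySem.Str.lower statement) then
    if ["asset", "cash", "inventory", "receivable"].any (fun t => PySem.Str.isIn t field_name) then
      "Balance_Sheet.Assets." ++ aTitled field_name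
    else if ["liability", "payable", "debt"].any (fun t => PySem.Str.isIn t field_name) then
      "Balance_Sheet.Liabilities." ++ aTitled field_name
    else if ["equity", "retained", "capital"].any (fun t => PySem.Str.isIn t field_name) then
      "Balance_Sheet.Equity." ++ aTitled field_name
    else aIncome scoped_name field_name statement
  else aIncome scoped_name field_name statement

def aCash (scoped_name field_name statement : String) : String :=
  if (!(statement == "")) && PySem.Str.isIn "cash" (PySem.Str.lower statement) then
    if PySem.Str.isIn "operating" (PySem.Str.lower scoped_name) then
      "CashFlow_Statement.Operating_Activities." ++ aTitled field_name
    else if PySem.Str.isIn "investing" (PySem.Str.lower scoped_name) then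
      "CashFlow_Statement.Investing_Activities." ++ aTitled field_name
    else if PySem.Str.isIn "financing" (PySem.Str.lower scoped_name) then
      "CashFlow_Statement.Financing_Activities." ++ aTitled field_name
    else aBalance scoped_name field_name statement
  else aBalance scoped_name field_name statement

def aProduct (scoped_name field_name statement : String) : String :=
  if ["materials_processing", "high_power", "pulsed", "qcw", "systems"].any (fun prod => PySem.Str.isIn prod field_name) then
    "Revenue_Statement.Product_Breakdown." ++ aTitled field_name
  else aCash scoped_name field_name statement

def apply_financial_scoping_rules (scoped_name : String) (field_name : String) (statement : String) (section_ : String) (subsection : String) : String :=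
  if ["north_america", "united_states", "germany", "china", "japan", "korea", "europe", "asia"].any (fun geo => PySem.Str.isIn geo field_name) then
    if PySem.Str.isIn "revenue" (PySem.Str.lower scoped_name) || PySem.Str.isIn "sales" (PySem.Str.lower scoped_name) then
      "Revenue_Statement.Geographic_Breakdown." ++ aTitled field_name
    else aProduct scoped_name field_name statement
  else aProduct scoped_name field_name statement

-- ===== PORT B =====
-- hits(s, terms) = any(t in s for t in terms)
def bHits (s : String) (terms : List String) : Bool := terms.any (fun t => PySem.Str.isIn t s)

-- the prefix -> condition dict (a literal with distinct keys -> its assoc list), eagerly evaluated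
def bConditions (sl stl field_name : String) : List (String × Bool) :=
  [ ("Revenue_Statement.Geographic_Breakdown",
      bHits field_name ["north_america", "united_states", "germany", "china", "japan", "korea", "europe", "asia"]
        && bHits sl ["revenue", "sales"]),
    ("Revenue_Statement.Product_Breakdown",
      bHits field_name ["materials_processing", "high_power", "pulsed", "qcw", "systems"]),
    ("CashFlow_Statement.Operating_Activities", PySem.Str.isIn "cash" stl && PySem.Str.isIn "operating" sl),
    ("CashFlow_Statement.Investing_Activities", PySem.Str.isIn "cash" stl && PySem.Str.isIn "investing" sl),
    ("CashFlow_Statement.Financing_Activities", PySem.Str.isIn "cash" stl && PySem.Str.isIn "financing" sl),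
    ("Balance_Sheet.Assets", PySem.Str.isIn "balance" stl && bHits field_name ["asset", "cash", "inventory", "receivable"]),
    ("Balance_Sheet.Liabilities", PySem.Str.isIn "balance" stl && bHits field_name ["liability", "payable", "debt"]),
    ("Balance_Sheet.Equity", PySem.Str.isIn "balance" stl && bHits field_name ["equity", "retained", "capital"]),
    ("Income_Statement.Revenue", bHits stl ["income", "operations"] && bHits field_name ["revenue", "sales", "net_sales"]),
    ("Income_Statement.Expenses", bHits stl ["income", "operations"] && bHits field_name ["cost", "expense"]),
    ("Income_Statement.Totals", bHits stl ["income", "operations"] && PySem.Str.isIn "total" field_name) ]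

-- the winners comprehension: [(rank, prefix) for rank, (prefix, ok) in enumerate(items, k) if ok]
-- (the start rank k is a parameter for the proofs; the port calls it with k = 0 as Python does)
def bWinners (k : Int) (l : List (String × Bool)) : List (Int × String) :=
  (PySem.List.enumerate l k).filterMap (fun rp => if rp.2.2 then some (rp.1, rp.2.1) else none)

-- Python's tuple '<' on (int, str) pairs, and min() as the standard first-minimum fold
def bPairLt (a b : Int × String) : Bool := a.1 < b.1 || (a.1 == b.1 && a.2 < b.2)

def bMin (h : Int × String) (t : List (Int × String)) : Int × String :=
  t.foldl (fun best x => if bPairLt x best then x else best) h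

def apply_financial_scoping_rules_alt (scoped_name : String) (field_name : String) (statement : String) (section_ : String) (subsection : String) : String :=
  let sl := PySem.Str.lower scoped_name
  let stl := PySem.Str.lower statement
  match bWinners 0 (bConditions sl stl field_name) with
  | [] => scoped_name
  | h :: t => (bMin h t).2 ++ "." ++ pyTitle field_name

-- ===== PRECONDITION & SPEC =====
def Spec_apply_financial_scoping_rules (scoped_name : String) (field_name : String) (statement : String) (section_ : String) (subsection : String) (out : String) : Prop := out = apply_financial_scoping_rules_alt scoped_name field_name statement section_ subsection
instance (scoped_name : String) (field_name : String) (statement : String) (section_ : String) (subsection : String) (out : String) : Decidable (Spec_apply_financial_scoping_rules scoped_name field_name statement section_ subsection out) := by unfold Spec_apply_financial_scoping_rules; infer_instance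

-- ===== CLAIM (what is proved, stated in full; the proofs are below) =====
def Claim_equal_apply_financial_scoping_rules : Prop := ∀ (scoped_name : String) (field_name : String) (statement : String) (section_ : String) (subsection : String), Dom_apply_financial_scoping_rules scoped_name field_name statement section_ subsection → Spec_apply_financial_scoping_rules scoped_name field_name statement section_ subsection (apply_financial_scoping_rules scoped_name field_name statement section_ subsection)

-- ===== LEMMAS AND PROOFS =====

-- .replace('_','_') is a no-op
theorem replace_go_underscore (fuel : Nat) (l acc : List Char) (h : l.length ≤ fuel) :
    PySem.Chars.replace.go ['_'] ['_'] fuel l acc = acc.reverse ++ l := by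
  induction fuel generalizing l acc with
  | zero =>
    cases l with
    | nil => simp [PySem.Chars.replace.go]
    | cons c t => simp at h
  | succ n ih =>
    cases l with
    | nil => simp [PySem.Chars.replace.go]
    | cons c t =>
      have hlen : t.length ≤ n := by simpa using h
      simp only [PySem.Chars.replace.go]
      by_cases hp : List.isPrefixOf ['_'] (c :: t) = true
      · have hc : c = '_' := by
          cases (List.isPrefixOf_iff_prefix.mp hp) with
          | intro w hw => simpa using congrArg (fun x => x.head?) hw.symm
        rw [if_pos hp, ih _ _ (by simpa using hlen)]
        subst hc; simp
      · rw [if_neg hp, ih _ _ hlen]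
        simp

theorem replace_underscore (s : String) : PySem.Str.replace s "_" "_" = s := by
  have h : (PySem.Str.replace s "_" "_").toList = s.toList := by
    rw [PySem.Str.toList_replace]
    show PySem.Chars.replace s.toList ['_'] ['_'] = s.toList
    unfold PySem.Chars.replace
    rw [if_neg (by simp)]
    simpa using replace_go_underscore s.toList.length s.toList [] (Nat.le_refl _)
  exact String.toList_inj.mp h

theorem aTitled_eq (f : String) : aTitled f = pyTitle f := by
  unfold aTitled; exact replace_underscore _

-- the first prefix whose flag is true: what the filter-then-min pipeline computes
def firstHit : List (String × Bool) → Option String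
  | [] => none
  | (p, ok) :: t => if ok then some p else firstHit t

theorem bWinners_cons_true (p : String) (t : List (String × Bool)) (k : Int) :
    bWinners k ((p, true) :: t) = (k, p) :: bWinners (k + 1) t := by
  simp [bWinners, PySem.List.enumerate_cons]

theorem bWinners_cons_false (p : String) (t : List (String × Bool)) (k : Int) :
    bWinners k ((p, false) :: t) = bWinners (k + 1) t := by
  simp [bWinners, PySem.List.enumerate_cons]

theorem mem_bWinners_ge (l : List (String × Bool)) (k : Int) (x : Int × String)
    (hx : x ∈ bWinners k l) : k ≤ x.1 := by
  induction l generalizing k with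
  | nil => simp [bWinners, PySem.List.enumerate_nil] at hx
  | cons q t ih =>
    obtain ⟨p, ok⟩ := q
    cases ok with
    | true =>
      rw [bWinners_cons_true] at hx
      rcases List.mem_cons.mp hx with h | h
      · subst h; simp
      · have := ih (k + 1) h; omega
    | false =>
      rw [bWinners_cons_false] at hx
      have := ih (k + 1) hx; omega

-- min() over a list of ranked pairs with a strictly larger tail is its head
theorem bMin_head (t : List (Int × String)) (h : Int × String)
    (hall : ∀ x ∈ t, h.1 < x.1) : bMin h t = h := by
  induction t generalizing h with
  | nil => rfl
  | cons x r ih =>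
    have hx : h.1 < x.1 := hall x (List.mem_cons_self)
    have hlt : bPairLt x h = false := by
      simp only [bPairLt, Bool.or_eq_false_iff, Bool.and_eq_false_iff,
        decide_eq_false_iff_not, beq_eq_false_iff_ne]
      exact ⟨by omega, Or.inl (by omega)⟩
    show bMin (if bPairLt x h then x else h) r = h
    rw [hlt]
    simp only [Bool.false_eq_true, if_false]
    exact ih h (fun y hy => hall y (List.mem_cons_of_mem _ hy))

-- the whole pipeline selects the first matching prefix (ranks strictly increase)
theorem select_eq (l : List (String × Bool)) (k : Int) (d suf : String) :
    (match bWinners k l with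
     | [] => d
     | h :: t => (bMin h t).2 ++ suf)
      = (match firstHit l with
         | none => d
         | some p => p ++ suf) := by
  induction l generalizing k with
  | nil => simp [bWinners, PySem.List.enumerate_nil, firstHit]
  | cons q t ih =>
    obtain ⟨p, ok⟩ := q
    cases ok with
    | true =>
      rw [bWinners_cons_true]
      have hmin : bMin (k, p) (bWinners (k + 1) t) = (k, p) :=
        bMin_head _ _ (fun x hx => by
          have := mem_bWinners_ge t (k + 1) x hx
          simpa using (by omega : k < x.1))
      simp [hmin, firstHit]
    | false =>
      rw [bWinners_cons_false, ih (k + 1)]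
      simp [firstHit]

def chainEval (l : List (String × Bool)) (d suf : String) : String :=
  match firstHit l with
  | none => d
  | some p => p ++ suf

theorem chainEval_nil (d suf : String) : chainEval [] d suf = d := rfl

theorem chainEval_cons (p : String) (ok : Bool) (t : List (String × Bool)) (d suf : String) :
    chainEval ((p, ok) :: t) d suf = if ok then p ++ suf else chainEval t d suf := by
  cases ok <;> simp [chainEval, firstHit]

-- collapsing A's duplicated else-branches into a linear chain
theorem nest1 {α : Type} (c1 c2 : Bool) (x r : α) :
    (if c1 then (if c2 then x else r) else r) = if c1 && c2 then x else r := by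
  cases c1 <;> simp

theorem nest3 {α : Type} (c i1 i2 i3 : Bool) (x y z : α) (r : α) :
    (if c then (if i1 then x else if i2 then y else if i3 then z else r) else r)
      = if c && i1 then x else if c && i2 then y else if c && i3 then z else r := by
  cases c <;> simp

set_option maxHeartbeats 4000000 in
theorem main_eq (scoped_name field_name statement section_ subsection : String) :
    apply_financial_scoping_rules scoped_name field_name statement section_ subsection
      = apply_financial_scoping_rules_alt scoped_name field_name statement section_ subsection := by
  have halt : apply_financial_scoping_rules_alt scoped_name field_name statement section_ subsection
      = chainEval (bConditions (PySem.Str.lower scoped_name) (PySem.Str.lower statement) field_name)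
          scoped_name ("." ++ pyTitle field_name) := by
    simp only [apply_financial_scoping_rules_alt, chainEval]
    rw [← select_eq _ 0]
    generalize bWinners 0 (bConditions (PySem.Str.lower scoped_name) (PySem.Str.lower statement) field_name) = w
    cases w <;> simp [String.append_assoc]
  rw [halt]
  unfold apply_financial_scoping_rules aProduct aCash aBalance aIncome
  simp only [bConditions, chainEval_cons, chainEval_nil, bHits, List.any_cons, List.any_nil,
    Bool.or_false, aTitled_eq, nest1, nest3]
  by_cases hst : (statement == "") = true
  · have he : statement = "" := by simpa using hst
    subst he
    simp only [hst, Bool.not_true, Bool.false_and, Bool.and_false,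
      show PySem.Str.isIn "cash" (PySem.Str.lower "") = false from by decide,
      show PySem.Str.isIn "balance" (PySem.Str.lower "") = false from by decide,
      show PySem.Str.isIn "income" (PySem.Str.lower "") = false from by decide,
      show PySem.Str.isIn "operations" (PySem.Str.lower "") = false from by decide,
      Bool.false_or, Bool.false_and, Bool.false_eq_true, if_false]
    simp only [Bool.and_comm, Bool.and_left_comm, Bool.and_assoc, ← String.append_assoc,
      show ("Revenue_Statement.Geographic_Breakdown" ++ "." : String) = "Revenue_Statement.Geographic_Breakdown." from rfl,
      show ("Revenue_Statement.Product_Breakdown" ++ "." : String) = "Revenue_Statement.Product_Breakdown." from rfl]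
  · have hst' : (statement == "") = false := by simpa using hst
    simp only [hst', Bool.not_false, Bool.true_and]
    simp only [Bool.and_comm, Bool.and_left_comm, Bool.and_assoc, ← String.append_assoc,
      show ("Revenue_Statement.Geographic_Breakdown" ++ "." : String) = "Revenue_Statement.Geographic_Breakdown." from rfl,
      show ("Revenue_Statement.Product_Breakdown" ++ "." : String) = "Revenue_Statement.Product_Breakdown." from rfl,
      show ("CashFlow_Statement.Operating_Activities" ++ "." : String) = "CashFlow_Statement.Operating_Activities." from rfl,
      show ("CashFlow_Statement.Investing_Activities" ++ "." : String) = "CashFlow_Statement.Investing_Activities." from rfl,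
      show ("CashFlow_Statement.Financing_Activities" ++ "." : String) = "CashFlow_Statement.Financing_Activities." from rfl,
      show ("Balance_Sheet.Assets" ++ "." : String) = "Balance_Sheet.Assets." from rfl,
      show ("Balance_Sheet.Liabilities" ++ "." : String) = "Balance_Sheet.Liabilities." from rfl,
      show ("Balance_Sheet.Equity" ++ "." : String) = "Balance_Sheet.Equity." from rfl,
      show ("Income_Statement.Revenue" ++ "." : String) = "Income_Statement.Revenue." from rfl,
      show ("Income_Statement.Expenses" ++ "." : String) = "Income_Statement.Expenses." from rfl,
      show ("Income_Statement.Totals" ++ "." : String) = "Income_Statement.Totals." from rfl]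

-- ===== VERDICT (by name: the statement is the Claim_ definition above) =====
theorem apply_financial_scoping_rules_spec : Claim_equal_apply_financial_scoping_rules := by
  intro scoped_name field_name statement section_ subsection _
  unfold Spec_apply_financial_scoping_rules
  exact main_eq scoped_name field_name statement section_ subsection
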